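-- pv_equiv track=rewrite | github.com/jackmappotion/programmers_algorithm | 해시/전화번호목록.py | get_candidate_dict
-- ===== SOURCE A (Python) =====
-- def get_candidate_dict(phone_book):
--     candidate_dict = {}
--     for length in set(map(lambda x: len(x), phone_book)):
--         candidate_dict[length] = set()
--
--     for phone in phone_book:
--         phone_length = len(phone)
--         for length in candidate_dict.keys():
--             if length < phone_length:
--                 candidate_dict[length].add(phone[:length])
--
--     return candidate_dict
-- ===== SOURCE B (Python) =====
-- def get_candidate_dict(phone_book):
--     lengths = set(map(len, phone_book))
--     buckets = {}
--     remaining = phone_book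
--     for length in sorted(lengths):
--         remaining = [p for p in remaining if len(p) > length]
--         buckets[length] = {p[:length] for p in remaining}
--     return {length: buckets[length] for length in lengths}
-- ===== Notes on version B (the rewrite author's own statement) =====
-- stated objective: alternative
-- what changed: Replaces A's per-phone scatter (each phone added into every shorter-length bucket while scanning all dict keys) by a sorted ascending sweep over the distinct lengths that prunes a shrinking 'remaining' list of still-longer phones; each bucket is the prefix set of that pruned list, and keys are finally emitted in length-set order.
import Mathlib
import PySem

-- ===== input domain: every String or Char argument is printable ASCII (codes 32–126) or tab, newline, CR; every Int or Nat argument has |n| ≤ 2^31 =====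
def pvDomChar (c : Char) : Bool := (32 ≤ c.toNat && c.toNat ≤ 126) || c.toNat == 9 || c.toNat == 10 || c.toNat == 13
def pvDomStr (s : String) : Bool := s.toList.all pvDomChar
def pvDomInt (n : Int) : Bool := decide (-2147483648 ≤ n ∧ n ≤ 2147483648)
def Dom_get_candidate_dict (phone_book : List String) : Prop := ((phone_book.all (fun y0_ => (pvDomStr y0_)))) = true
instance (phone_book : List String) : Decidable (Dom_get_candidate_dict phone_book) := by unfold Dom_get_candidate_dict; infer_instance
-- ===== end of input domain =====

-- B replaces A's per-phone scatter into all shorter-length buckets by a sorted ascending sweep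
-- over the distinct lengths with a progressively pruned list of still-longer phones; objective: alternative.

-- ===== PORT A =====
def get_candidate_dict (phone_book : List String) : List (Int × List String) :=
  -- candidate_dict = {}; for length in set(map(len, phone_book)): candidate_dict[length] = set()
  let d0 : PySem.Dict Int (List String) :=
    (PySem.Set.ofList (phone_book.map (fun x => PySem.Str.len x))).foldl
      (fun d length => d.insert length (PySem.Set.empty : List String)) PySem.Dict.empty
  -- for phone in phone_book: for length in candidate_dict.keys(): if length < len(phone): bucket.add(phone[:length])
  let d : PySem.Dict Int (List String) :=
    phone_book.foldl
      (fun d phone =>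
        d.keys.foldl
          (fun d' length =>
            if length < PySem.Str.len phone then
              d'.modify length [] (fun s => PySem.Set.add s (PySem.Str.slice phone none (some length)))
            else d') d) d0
  d.items

-- ===== PORT B =====
def get_candidate_dict_alt (phone_book : List String) : List (Int × List String) :=
  -- lengths = set(map(len, phone_book))
  let lengths : PySem.Set Int := PySem.Set.ofList (phone_book.map (fun x => PySem.Str.len x))
  -- buckets = {}; remaining = phone_book
  -- for length in sorted(lengths): remaining = [p for p in remaining if len(p) > length]; buckets[length] = {p[:length] for p in remaining}
  let st : PySem.Dict Int (List String) × List String :=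
    (PySem.List.sorted lengths (fun x => x) false).foldl
      (fun (st : PySem.Dict Int (List String) × List String) length =>
        let remaining := st.2.filter (fun p => length < PySem.Str.len p)
        (st.1.insert length
          (PySem.Set.ofList (remaining.map (fun p => PySem.Str.slice p none (some length)))),
         remaining))
      (PySem.Dict.empty, phone_book)
  -- return {length: buckets[length] for length in lengths}   (every length is a key of buckets, so the lookup never raises; getD is exact here)
  (lengths.foldl (fun d length => d.insert length (st.1.getD length [])) PySem.Dict.empty).items

-- ===== PRECONDITION & SPEC =====
def Spec_get_candidate_dict (phone_book : List String) (out : List (Int × List String)) : Prop := out = get_candidate_dict_alt phone_book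
instance (phone_book : List String) (out : List (Int × List String)) : Decidable (Spec_get_candidate_dict phone_book out) := by unfold Spec_get_candidate_dict; infer_instance

-- ===== CLAIM (what is proved, stated in full; the proofs are below) =====
def Claim_equal_get_candidate_dict : Prop := ∀ (phone_book : List String), Dom_get_candidate_dict phone_book → Spec_get_candidate_dict phone_book (get_candidate_dict phone_book)

-- ===== LEMMAS AND PROOFS =====

-- proof-side abbreviation: the bucket both programs compute for a given length
def pvGather (phone_book : List String) (l : Int) : List String :=
  PySem.Set.ofList ((phone_book.filter (fun p => l < PySem.Str.len p)).map
    (fun p => PySem.Str.slice p none (some l)))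

-- proof-side abbreviation: the body of A's inner per-key loop
def pvUpd (p : String) (d : PySem.Dict Int (List String)) (length : Int) : PySem.Dict Int (List String) :=
  if length < PySem.Str.len p then
    d.modify length [] (fun s => PySem.Set.add s (PySem.Str.slice p none (some length)))
  else d

-- the gather set equals A's conditional foldl over all phones
theorem pvGatherFold (l : Int) (ps : List String) (s : PySem.Set String) :
    ((ps.filter (fun p => l < PySem.Str.len p)).map
        (fun p => PySem.Str.slice p none (some l))).foldl PySem.Set.add s
      = ps.foldl (fun s p => if l < PySem.Str.len p then PySem.Set.add s (PySem.Str.slice p none (some l)) else s) s := by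
  induction ps generalizing s with
  | nil => rfl
  | cons p ps ih =>
    rw [List.foldl_cons, List.filter_cons]
    by_cases h : l < PySem.Str.len p
    · rw [if_pos (by simpa using h), if_pos h, List.map_cons, List.foldl_cons]
      exact ih _
    · rw [if_neg (by simpa using h), if_neg h]
      exact ih _

-- a per-key update with key ≠ l passes over a head entry with key l
theorem pvUpdCons (p : String) (l k : Int) (s : List String) (rest : List (Int × List String))
    (hne : k ≠ l) :
    (pvUpd p (PySem.Dict.mk ((l, s) :: rest)) k).items
      = (l, s) :: (pvUpd p (PySem.Dict.mk rest) k).items := by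
  have hlk : ¬ (l = k) := fun h => hne h.symm
  have hne' : (l == k) = false := by simp [hlk]
  unfold pvUpd
  by_cases hlt : k < PySem.Str.len p
  · rw [if_pos hlt, if_pos hlt]
    by_cases hc : (rest.any fun q => q.1 == k) = true <;>
      simp [PySem.Dict.modify, PySem.Dict.insert, PySem.Dict.getD, PySem.Dict.get?,
        PySem.Dict.contains, hne', hc, hlk]
  · rw [if_neg hlt, if_neg hlt]

theorem pvFoldUpdCons (p : String) (l : Int) (s : List String) (rest : List (Int × List String))
    (K : List Int) (hne : ∀ k ∈ K, k ≠ l) :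
    (K.foldl (pvUpd p) (PySem.Dict.mk ((l, s) :: rest))).items
      = (l, s) :: (K.foldl (pvUpd p) (PySem.Dict.mk rest)).items := by
  induction K generalizing s rest with
  | nil => rfl
  | cons k K ih =>
    have h1 := pvUpdCons p l k s rest (hne k (by simp))
    rw [List.foldl_cons, List.foldl_cons]
    have h2 : pvUpd p (PySem.Dict.mk ((l, s) :: rest)) k
        = PySem.Dict.mk ((l, s) :: (pvUpd p (PySem.Dict.mk rest) k).items) := by
      cases hmk : pvUpd p (PySem.Dict.mk ((l, s) :: rest)) k with
      | mk items => rw [hmk] at h1; dsimp only at h1; simp [h1]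
    rw [h2]
    exact ih s _ (fun k' hk' => hne k' (by simp [hk']))

-- one phone pass of A over the whole dict, in map form
theorem pvStepItems (p : String) (L : List Int) (g : Int → List String) (hnd : L.Nodup) :
    ((L.map (fun l => (l, g l))).map Prod.fst |>.foldl (pvUpd p)
        (PySem.Dict.mk (L.map (fun l => (l, g l))))).items
      = L.map (fun l =>
          (l, if l < PySem.Str.len p then PySem.Set.add (g l) (PySem.Str.slice p none (some l)) else g l)) := by
  induction L with
  | nil => rfl
  | cons l L ih =>
    have hnotin : l ∉ L := (List.nodup_cons.mp hnd).1
    have hnd' : L.Nodup := (List.nodup_cons.mp hnd).2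
    simp only [List.map_cons, List.foldl_cons]
    have hfirst : pvUpd p (PySem.Dict.mk ((l, g l) :: L.map (fun l => (l, g l)))) l
        = PySem.Dict.mk ((l, if l < PySem.Str.len p then PySem.Set.add (g l) (PySem.Str.slice p none (some l)) else g l)
            :: L.map (fun l => (l, g l))) := by
      unfold pvUpd
      by_cases hlt : l < PySem.Str.len p
      · rw [if_pos hlt, if_pos hlt]
        simp [PySem.Dict.modify, PySem.Dict.insert, PySem.Dict.getD, PySem.Dict.get?,
          PySem.Dict.contains]
        exact fun a ha hal => absurd (hal ▸ ha) hnotin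
      · rw [if_neg hlt, if_neg hlt]
    rw [hfirst, pvFoldUpdCons p _ _ _ _ (by
      intro k hk
      simp only [List.map_map, List.mem_map] at hk
      obtain ⟨x, hx, rfl⟩ := hk
      rintro rfl; exact hnotin hx)]
    simp only [List.cons.injEq, true_and]
    simpa using ih hnd'

-- A's whole phone loop, in map form
theorem pvLoopItems (ps : List String) (L : List Int) (hnd : L.Nodup) (g : Int → List String) :
    (ps.foldl
        (fun d phone => d.keys.foldl (pvUpd phone) d)
        (PySem.Dict.mk (L.map (fun l => (l, g l))))).items
      = L.map (fun l =>
          (l, ps.foldl (fun s p => if l < PySem.Str.len p then PySem.Set.add s (PySem.Str.slice p none (some l)) else s) (g l))) := by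
  induction ps generalizing g with
  | nil => simp
  | cons p ps ih =>
    rw [List.foldl_cons]
    have hstep := pvStepItems p L g hnd
    have hd : (PySem.Dict.mk (L.map (fun l => (l, g l)))).keys.foldl (pvUpd p)
          (PySem.Dict.mk (L.map (fun l => (l, g l))))
        = PySem.Dict.mk (L.map (fun l =>
            (l, if l < PySem.Str.len p then PySem.Set.add (g l) (PySem.Str.slice p none (some l)) else g l))) := by
      cases hmk : (PySem.Dict.mk (L.map (fun l => (l, g l)))).keys.foldl (pvUpd p)
          (PySem.Dict.mk (L.map (fun l => (l, g l)))) with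
      | mk items =>
        have hkeys : (PySem.Dict.mk (L.map (fun l => (l, g l)))).keys
            = (L.map (fun l => (l, g l))).map Prod.fst := by
          simp [PySem.Dict.keys]
        rw [hkeys] at hmk
        rw [hmk] at hstep
        dsimp only at hstep
        simp [hstep]
    rw [hd, ih _]
    refine List.map_congr_left (fun l _ => ?_)
    by_cases hlt : l < PySem.Str.len p <;> simp

-- A's result in canonical map form
theorem pvA_items (phone_book : List String) :
    get_candidate_dict phone_book
      = (PySem.Set.ofList (phone_book.map (fun x => PySem.Str.len x))).map
          (fun l => (l, pvGather phone_book l)) := by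
  unfold get_candidate_dict
  set L := PySem.Set.ofList (phone_book.map (fun x => PySem.Str.len x)) with hL
  have hnd : L.Nodup := PySem.Set.nodup_ofList _
  have hinit : (L.foldl (fun d length => d.insert length (PySem.Set.empty : List String))
        (PySem.Dict.empty : PySem.Dict Int (List String)))
      = PySem.Dict.mk (L.map (fun l => (l, ([] : List String)))) := by
    apply PySem.Dict.ext
    rw [PySem.Dict.items_foldl_insert_fresh L (fun l => l)
      (fun _ => (PySem.Set.empty : List String)) PySem.Dict.empty (fun _ _ => rfl) (by simpa using hnd)]
    simp [PySem.Dict.empty, PySem.Set.empty]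
  simp only [hinit]
  have hupd : (fun (d : PySem.Dict Int (List String)) (phone : String) =>
      d.keys.foldl
        (fun d' length =>
          if length < PySem.Str.len phone then
            d'.modify length [] (fun s => PySem.Set.add s (PySem.Str.slice phone none (some length)))
          else d') d)
      = fun d phone => d.keys.foldl (pvUpd phone) d := by
    funext d phone; rfl
  rw [hupd, pvLoopItems phone_book L hnd (fun _ => [])]
  refine List.map_congr_left (fun l _ => ?_)
  unfold pvGather
  rw [← pvGatherFold, ← PySem.Set.ofList_eq_foldl]

-- B's sweep: while the invariant 'remaining filters like phone_book for every pending length' holds,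
-- the fold inserts exactly the gather buckets
theorem pvSweep (phone_book : List String) (ds : List Int) (rem : List String)
    (d : PySem.Dict Int (List String))
    (hord : ds.Pairwise (· < ·))
    (hrem : ∀ l ∈ ds, rem.filter (fun p => l < PySem.Str.len p)
        = phone_book.filter (fun p => l < PySem.Str.len p)) :
    (ds.foldl
        (fun (st : PySem.Dict Int (List String) × List String) length =>
          let remaining := st.2.filter (fun p => length < PySem.Str.len p)
          (st.1.insert length
            (PySem.Set.ofList (remaining.map (fun p => PySem.Str.slice p none (some length)))),
           remaining))
        (d, rem)).1
      = ds.foldl (fun d l => d.insert l (pvGather phone_book l)) d := by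
  induction ds generalizing rem d with
  | nil => rfl
  | cons l ds ih =>
    have hfilter : rem.filter (fun p => l < PySem.Str.len p)
        = phone_book.filter (fun p => l < PySem.Str.len p) := hrem l (by simp)
    have hlt : ∀ l' ∈ ds, l < l' := by
      intro l' hl'; exact (List.pairwise_cons.mp hord).1 l' hl'
    simp only [List.foldl_cons]
    rw [hfilter]
    refine ih _ _ (List.pairwise_cons.mp hord).2 (fun l' hl' => ?_)
    rw [List.filter_filter]
    refine List.filter_congr (fun p _ => ?_)
    by_cases h : l' < (p.length : Int)
    · simp [h, lt_trans (hlt l' hl') h]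
    · simp [h]

theorem get_candidate_dict_eq (phone_book : List String) :
    get_candidate_dict phone_book = get_candidate_dict_alt phone_book := by
  rw [pvA_items]
  simp only [get_candidate_dict_alt]
  set L := PySem.Set.ofList (phone_book.map (fun x => PySem.Str.len x)) with hL
  have hndL : L.Nodup := PySem.Set.nodup_ofList _
  set ds := PySem.List.sorted L (fun x => x) false with hds
  have hord : ds.Pairwise (· < ·) := PySem.List.sorted_ofList_pairwise_lt _
  have hperm : ds.Perm L := PySem.List.sorted_perm _ _ _
  have hndds : ds.Nodup := hperm.nodup_iff.mpr hndL
  -- the sweep builds exactly the gather buckets, keyed by ds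
  rw [pvSweep phone_book ds phone_book PySem.Dict.empty hord (fun _ _ => rfl)]
  -- its items: fresh distinct keys append
  have hbitems : (ds.foldl (fun d l => d.insert l (pvGather phone_book l))
        (PySem.Dict.empty : PySem.Dict Int (List String))).items
      = ds.map (fun l => (l, pvGather phone_book l)) := by
    rw [PySem.Dict.items_foldl_insert_fresh ds (fun l => l)
      (fun l => pvGather phone_book l) PySem.Dict.empty (fun _ _ => rfl) (by simpa using hndds)]
    simp [PySem.Dict.empty]
  -- every length of L is looked up to its gather bucket
  have hget : ∀ l ∈ L, (ds.foldl (fun d l => d.insert l (pvGather phone_book l))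
        (PySem.Dict.empty : PySem.Dict Int (List String))).getD l [] = pvGather phone_book l := by
    intro l hl
    have hlds : l ∈ ds := hperm.mem_iff.mpr hl
    refine PySem.Dict.getD_of_mem_items _ ?_ ?_ []
    · rw [hbitems]; exact List.mem_map.mpr ⟨l, hlds, rfl⟩
    · show ((ds.foldl (fun d l => d.insert l (pvGather phone_book l))
        (PySem.Dict.empty : PySem.Dict Int (List String))).items.map Prod.fst).Nodup
      rw [hbitems, List.map_map]
      have hmap : ds.map (Prod.fst ∘ fun l => (l, pvGather phone_book l)) = ds :=
        (List.map_congr_left fun x _ => rfl).trans (List.map_id _)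
      rw [hmap]; exact hndds
  -- final reorder over L: fresh distinct keys append
  rw [PySem.Dict.items_foldl_insert_fresh L (fun l => l)
    (fun l => (ds.foldl (fun d l => d.insert l (pvGather phone_book l))
      (PySem.Dict.empty : PySem.Dict Int (List String))).getD l []) PySem.Dict.empty
    (fun _ _ => rfl) (by simpa using hndL)]
  show List.map (fun l => (l, pvGather phone_book l)) L
      = List.map (fun l => (l, (ds.foldl (fun d l => d.insert l (pvGather phone_book l))
          (PySem.Dict.empty : PySem.Dict Int (List String))).getD l [])) L
  exact (List.map_congr_left (fun l hl => by rw [hget l hl])).symm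

-- ===== VERDICT (by name: the statement is the Claim_ definition above) =====
theorem get_candidate_dict_spec : Claim_equal_get_candidate_dict := by
  intro phone_book _
  exact get_candidate_dict_eq phone_book
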